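-- pv_equiv track=rewrite | github.com/Lestat2Lioncourt/data-forge-studio | src/dataforge_studio/utils/sql_formatter.py | _split_case_clauses
-- ===== SOURCE A (Python) =====
-- def _split_case_clauses(text: str) -> list[str]:
--     """Split CASE body into WHEN/ELSE clauses respecting parens and strings.
--     Input: text between CASE and END (exclusive).
--     Returns list of clause strings like ['WHEN ... THEN ...', 'ELSE ...']."""
--     clauses = []
--     upper = text.upper()
--     depth = 0
--     in_single = False
--     current_start = 0
--     i = 0
--     length = len(text)
--
--     # Skip leading whitespace to find first WHEN
--     while current_start < length and text[current_start] in (' ', '\t', '\n', '\r'):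
--         current_start += 1
--     i = current_start
--
--     while i < length:
--         ch = text[i]
--         if ch == "'" and not in_single:
--             in_single = True
--         elif ch == "'" and in_single:
--             in_single = False
--         elif not in_single:
--             if ch == '(':
--                 depth += 1
--             elif ch == ')':
--                 depth -= 1
--             elif depth == 0:
--                 # Check for WHEN or ELSE keyword boundary
--                 for kw in ('WHEN', 'ELSE'):
--                     kw_len = len(kw)
--                     if upper[i:i + kw_len] == kw:
--                         before_ok = (i == 0 or not (upper[i - 1].isalnum() or upper[i - 1] == '_'))
--                         after_ok = (i + kw_len >= length or not (upper[i + kw_len].isalnum() or upper[i + kw_len] == '_'))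
--                         if before_ok and after_ok and i > current_start:
--                             clause = text[current_start:i].strip()
--                             if clause:
--                                 clauses.append(clause)
--                             current_start = i
--                             break
--         i += 1
--
--     # Last clause
--     remaining = text[current_start:].strip()
--     if remaining:
--         clauses.append(remaining)
--     return clauses
-- ===== SOURCE B (Python) =====
-- def _split_case_clauses(text: str) -> list[str]:
--     """Staged-array variant: quote-parity and depth masks first, then a
--     declarative filter picks boundary positions, then slicing."""
--     n = len(text)
--     upper = text.upper()
--     start = 0
--     while start < n and text[start] in (' ', '\t', '\n', '\r'):
--         start += 1
--     # stage 1: mask of positions outside single quotes (and not a quote char)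
--     code = []
--     quoted = False
--     for ch in text:
--         code.append(not quoted and ch != "'")
--         if ch == "'":
--             quoted = not quoted
--     # stage 2: paren depth before each position (prefix sums over code parens)
--     depth = []
--     d = 0
--     for ch, is_code in zip(text, code):
--         depth.append(d)
--         if is_code:
--             if ch == '(':
--                 d += 1
--             elif ch == ')':
--                 d -= 1
--     # stage 3: keyword boundary positions, one declarative filter
--     def word(c):
--         return c.isalnum() or c == '_'
--     bounds = [i for i in range(start + 1, n)
--               if code[i] and depth[i] == 0
--               and upper[i:i + 4] in ('WHEN', 'ELSE')
--               and not word(upper[i - 1])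
--               and (i + 4 >= n or not word(upper[i + 4]))]
--     # stage 4: slice between consecutive boundaries, strip, drop empties
--     pieces = [text[a:b].strip() for a, b in zip([start] + bounds, bounds + [n])]
--     return [p for p in pieces if p]
-- ===== Notes on version B (the rewrite author's own statement) =====
-- stated objective: alternative
-- what changed: Replaces A's single stateful scan (quote flag, paren depth, current_start and clause list all updated inline) by staged arrays: one pass builds a quote-parity mask, a second builds a paren-depth prefix list, then a declarative filter over positions picks the WHEN/ELSE boundaries, and a final zip/slice pass assembles the clauses.
import Mathlib
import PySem

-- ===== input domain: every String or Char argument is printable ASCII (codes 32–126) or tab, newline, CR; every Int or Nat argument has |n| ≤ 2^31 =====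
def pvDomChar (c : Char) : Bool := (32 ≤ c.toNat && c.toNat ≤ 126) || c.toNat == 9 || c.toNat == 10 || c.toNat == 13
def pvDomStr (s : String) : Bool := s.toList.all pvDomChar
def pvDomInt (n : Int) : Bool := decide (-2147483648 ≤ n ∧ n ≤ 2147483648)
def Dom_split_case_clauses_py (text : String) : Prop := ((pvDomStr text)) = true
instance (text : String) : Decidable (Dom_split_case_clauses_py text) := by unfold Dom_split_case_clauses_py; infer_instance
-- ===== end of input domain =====

-- B replaces A's stateful splitting scan by staged arrays: a quote-parity mask and a
-- paren-depth prefix list are computed first, boundary positions come from one declarative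
-- filter over those arrays, and slicing happens last; return values proved equal everywhere.

-- shared by both ports: the leading-whitespace skip (the identical first while loop of both Pythons)
def pvSkipWs (cs : List Char) (k : Nat) : Nat :=
  if h : k < cs.length then
    if cs[k] = ' ' ∨ cs[k] = '\t' ∨ cs[k] = '\n' ∨ cs[k] = '\r' then pvSkipWs cs (k + 1) else k
  else k
termination_by cs.length - k

-- ===== PORT A =====
-- upper[i-1].isalnum() or upper[i-1] == '_'  (the index is always in range where A evaluates it)
def pvWordA (c : Char) : Bool := PySem.Str.isalnum c || c = '_'

def pvBeforeOkA (upper : List Char) (i : Nat) : Bool :=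
  decide (i = 0) || !(pvWordA (PySem.List.pyGetD upper ((i : Int) - 1) ' '))

def pvAfterOkA (upper : List Char) (i : Nat) : Bool :=
  decide (upper.length ≤ i + 4) || !(pvWordA (PySem.List.pyGetD upper ((i : Int) + 4) ' '))

-- A's main while loop; the trailing 'remaining' handling is the i ≥ length base case
def pvLoopA (cs upper : List Char) (i cur : Nat) (depth : Int) (insingle : Bool)
    (acc : List String) : List String :=
  if h : i < cs.length then
    let ch := cs[i]
    if ch = '\'' ∧ insingle = false then
      pvLoopA cs upper (i + 1) cur depth true acc
    else if ch = '\'' ∧ insingle = true then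
      pvLoopA cs upper (i + 1) cur depth false acc
    else if insingle = false then
      if ch = '(' then pvLoopA cs upper (i + 1) cur (depth + 1) insingle acc
      else if ch = ')' then pvLoopA cs upper (i + 1) cur (depth - 1) insingle acc
      else if depth = 0 then
        if PySem.List.slice upper (some (i : Int)) (some ((i : Int) + 4)) = "WHEN".toList then
          if pvBeforeOkA upper i && pvAfterOkA upper i && decide (cur < i) then
            let clause := String.ofList (PySem.Chars.strip
              (PySem.List.slice cs (some (cur : Int)) (some (i : Int))))
            pvLoopA cs upper (i + 1) i depth insingle
              (if clause ≠ "" then acc ++ [clause] else acc)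
          else pvLoopA cs upper (i + 1) cur depth insingle acc
        else if PySem.List.slice upper (some (i : Int)) (some ((i : Int) + 4)) = "ELSE".toList then
          if pvBeforeOkA upper i && pvAfterOkA upper i && decide (cur < i) then
            let clause := String.ofList (PySem.Chars.strip
              (PySem.List.slice cs (some (cur : Int)) (some (i : Int))))
            pvLoopA cs upper (i + 1) i depth insingle
              (if clause ≠ "" then acc ++ [clause] else acc)
          else pvLoopA cs upper (i + 1) cur depth insingle acc
        else pvLoopA cs upper (i + 1) cur depth insingle acc
      else pvLoopA cs upper (i + 1) cur depth insingle acc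
    else pvLoopA cs upper (i + 1) cur depth insingle acc
  else
    let remaining := String.ofList (PySem.Chars.strip (PySem.List.slice cs (some (cur : Int)) none))
    if remaining ≠ "" then acc ++ [remaining] else acc
termination_by cs.length - i

def split_case_clauses_py (text : String) : List String :=
  let cs := text.toList
  let upper := PySem.Chars.upper cs
  let start := pvSkipWs cs 0
  pvLoopA cs upper start start 0 false []

-- ===== PORT B =====
-- Source B's local helper word(c)
def pvWordB (c : Char) : Bool := PySem.Str.isalnum c || c = '_'

-- stage 1 of Source B: mask of positions outside single quotes (and not a quote char)
def pvCodeMask : List Char → Bool → List Bool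
  | [], _ => []
  | c :: rest, q =>
      (!q && decide (c ≠ '\'')) :: pvCodeMask rest (if c = '\'' then !q else q)

-- stage 2 of Source B: paren depth before each position (loop over zip(text, code))
def pvDepthList : List (Char × Bool) → Int → List Int
  | [], _ => []
  | (c, m) :: rest, d =>
      d :: pvDepthList rest
        (if m then (if c = '(' then d + 1 else if c = ')' then d - 1 else d) else d)

def split_case_clauses_py_alt (text : String) : List String :=
  let cs := text.toList
  let upper := PySem.Chars.upper cs
  let start := pvSkipWs cs 0
  let code := pvCodeMask cs false
  let depth := pvDepthList (cs.zip code) 0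
  -- stage 3: keyword boundary positions, one declarative filter over the arrays
  let bounds := (PySem.List.pyRange ((start : Int) + 1) (cs.length : Int) 1).filter (fun i =>
      PySem.List.pyGetD code i false
      && decide (PySem.List.pyGetD depth i 0 = 0)
      && (decide (PySem.List.slice upper (some i) (some (i + 4)) = "WHEN".toList)
          || decide (PySem.List.slice upper (some i) (some (i + 4)) = "ELSE".toList))
      && !(pvWordB (PySem.List.pyGetD upper (i - 1) ' '))
      && (decide ((cs.length : Int) ≤ i + 4) || !(pvWordB (PySem.List.pyGetD upper (i + 4) ' '))))
  -- stage 4: slice between consecutive boundaries, strip, drop empties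
  (((((start : Int) :: bounds).zip (bounds ++ [(cs.length : Int)])).map
      (fun p => String.ofList (PySem.Chars.strip (PySem.List.slice cs (some p.1) (some p.2))))).filter
    (fun p => decide (p ≠ "")))

-- ===== PRECONDITION & SPEC =====
def Spec_split_case_clauses_py (text : String) (out : List String) : Prop := out = split_case_clauses_py_alt text
instance (text : String) (out : List String) : Decidable (Spec_split_case_clauses_py text out) := by unfold Spec_split_case_clauses_py; infer_instance

-- ===== CLAIM (what is proved, stated in full; the proofs are below) =====
def Claim_equal_split_case_clauses_py : Prop := ∀ (text : String), Dom_split_case_clauses_py text → Spec_split_case_clauses_py text (split_case_clauses_py text)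

-- ===== LEMMAS AND PROOFS =====

-- the list of clauses cut out of cs at a given boundary list, starting at cur
def pvBuild (cs : List Char) (cur : Nat) : List Nat → List String
  | [] =>
    let r := String.ofList (PySem.Chars.strip (cs.drop cur))
    if r ≠ "" then [r] else []
  | b :: bs =>
    (let c := String.ofList (PySem.Chars.strip ((cs.drop cur).take (b - cur)))
     if c ≠ "" then [c] else []) ++ pvBuild cs b bs

-- combined word-boundary test, proof-side
def pvBoundB (upper : List Char) (i : Nat) : Bool :=
  if decide (0 < i) && (PySem.Str.isalnum (PySem.List.pyGetD upper ((i : Int) - 1) ' ')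
      || PySem.List.pyGetD upper ((i : Int) - 1) ' ' = '_') then false
  else if decide (i + 4 < upper.length) && (PySem.Str.isalnum (PySem.List.pyGetD upper ((i : Int) + 4) ' ')
      || PySem.List.pyGetD upper ((i : Int) + 4) ' ' = '_') then false
  else true

-- proof-side boundary scanner: the list of indices where A starts a new clause
def pvScanB (cs upper : List Char) (start i : Nat) (depth : Int) (insingle : Bool) : List Nat :=
  if h : i < cs.length then
    let ch := cs[i]
    if ch = '\'' then pvScanB cs upper start (i + 1) depth (!insingle)
    else if insingle then pvScanB cs upper start (i + 1) depth insingle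
    else if ch = '(' then pvScanB cs upper start (i + 1) (depth + 1) insingle
    else if ch = ')' then pvScanB cs upper start (i + 1) (depth - 1) insingle
    else if decide (depth = 0) && decide (start < i)
        && (PySem.List.slice upper (some (i : Int)) (some ((i : Int) + 4)) = "WHEN".toList
            || PySem.List.slice upper (some (i : Int)) (some ((i : Int) + 4)) = "ELSE".toList)
        && pvBoundB upper i then
      i :: pvScanB cs upper start (i + 1) depth insingle
    else pvScanB cs upper start (i + 1) depth insingle
  else []
termination_by cs.length - i

theorem pvBoundB_eq (upper : List Char) (i : Nat) :
    pvBoundB upper i = (pvBeforeOkA upper i && pvAfterOkA upper i) := by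
  have e1 : decide (i = 0) = !decide (0 < i) := by
    by_cases h : i = 0 <;> simp [h, Nat.pos_iff_ne_zero]
  have e2 : decide (upper.length ≤ i + 4) = !decide (i + 4 < upper.length) := by
    by_cases h : i + 4 < upper.length <;> simp [h, Nat.le_of_not_lt]
  unfold pvBoundB pvBeforeOkA pvAfterOkA pvWordA
  rw [e1, e2]
  cases hd0 : decide (0 < i) <;> cases hd4 : decide (i + 4 < upper.length) <;>
  cases hb : (PySem.Str.isalnum (PySem.List.pyGetD upper ((i : Int) - 1) ' ')
      || decide (PySem.List.pyGetD upper ((i : Int) - 1) ' ' = '_')) <;>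
  cases ha : (PySem.Str.isalnum (PySem.List.pyGetD upper ((i : Int) + 4) ' ')
      || decide (PySem.List.pyGetD upper ((i : Int) + 4) ' ' = '_')) <;>
  simp_all

theorem pvLoopA_eq (cs upper : List Char) (start i cur : Nat) (depth : Int) (insingle : Bool)
    (acc : List String) (h1 : start ≤ cur) (h2 : cur ≤ i) (h3 : cur = start ∨ cur < i) :
    pvLoopA cs upper i cur depth insingle acc
      = acc ++ pvBuild cs cur (pvScanB cs upper start i depth insingle) := by
  have hg : decide (cur < i) = decide (start < i) := by
    rcases h3 with h3 | h3
    · rw [h3]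
    · simp [h3, lt_of_le_of_lt h1 h3]
  unfold pvLoopA pvScanB
  by_cases h : i < cs.length
  · simp only [dif_pos h]
    have ih_same : ∀ d ins, cur ≤ i + 1 → pvLoopA cs upper (i + 1) cur d ins acc
        = acc ++ pvBuild cs cur (pvScanB cs upper start (i + 1) d ins) := by
      intro d ins _
      exact pvLoopA_eq cs upper start (i + 1) cur d ins acc h1 (Nat.le_succ_of_le h2)
        (by rcases h3 with h3 | h3; exact Or.inl h3; exact Or.inr (Nat.lt_succ_of_lt h3))
    by_cases hq : cs[i] = '\''
    · cases insingle
      · simp only [hq]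
        simp
        exact ih_same _ _ (Nat.le_succ_of_le h2)
      · simp only [hq]
        simp
        exact ih_same _ _ (Nat.le_succ_of_le h2)
    · cases insingle
      · by_cases hp : cs[i] = '('
        · simp only [hp] at hq ⊢
          simp
          exact ih_same _ _ (Nat.le_succ_of_le h2)
        · by_cases hr : cs[i] = ')'
          · simp only [hr] at hq ⊢
            simp
            exact ih_same _ _ (Nat.le_succ_of_le h2)
          · by_cases hd : depth = 0
            · subst hd
              have hsu : (start < i) ↔ (cur < i) := by
                rcases h3 with h3 | h3
                · rw [h3]
                · exact ⟨fun _ => h3, fun _ => lt_of_le_of_lt h1 h3⟩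
              have hrec : cur < i →
                  pvLoopA cs upper (i + 1) i 0 false
                      (if PySem.Chars.strip (PySem.List.slice cs (some (cur : Int)) (some (i : Int))) = [] then acc
                       else acc ++ [String.ofList (PySem.Chars.strip (PySem.List.slice cs (some (cur : Int)) (some (i : Int))))])
                    = acc ++ pvBuild cs cur (i :: pvScanB cs upper start (i + 1) 0 false) := by
                intro hcu
                rw [pvLoopA_eq cs upper start (i + 1) i 0 false _
                  (le_of_lt (lt_of_le_of_lt h1 hcu)) (Nat.le_succ i) (Or.inr (Nat.lt_succ_self i)),
                  pvBuild]
                by_cases hc : PySem.Chars.strip (List.take (i - cur) (List.drop cur cs)) = [] <;>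
                  simp [PySem.List.slice_natCast, hc]
              by_cases hW : PySem.List.slice upper (some (i : Int)) (some ((i : Int) + 4)) = "WHEN".toList
              · by_cases hok : (pvBeforeOkA upper i = true ∧ pvAfterOkA upper i = true) <;>
                  by_cases hcu : cur < i <;>
                  simp [hq, hp, hr, hW, pvBoundB_eq, Bool.and_eq_true, hsu, hcu, hok] <;>
                  first
                    | exact ih_same _ _ (Nat.le_succ_of_le h2)
                    | exact hrec hcu
              · by_cases hE : PySem.List.slice upper (some (i : Int)) (some ((i : Int) + 4)) = "ELSE".toList
                · by_cases hok : (pvBeforeOkA upper i = true ∧ pvAfterOkA upper i = true) <;>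
                    by_cases hcu : cur < i <;>
                    simp [hq, hp, hr, hE, pvBoundB_eq, Bool.and_eq_true, hsu, hcu, hok] <;>
                    first
                      | exact ih_same _ _ (Nat.le_succ_of_le h2)
                      | exact hrec hcu
                · have hW' : ¬ PySem.List.slice upper (some (i : Int)) (some ((i : Int) + 4))
                      = ['W', 'H', 'E', 'N'] := hW
                  have hE' : ¬ PySem.List.slice upper (some (i : Int)) (some ((i : Int) + 4))
                      = ['E', 'L', 'S', 'E'] := hE
                  simp [hq, hp, hr, hW', hE']
                  exact ih_same _ _ (Nat.le_succ_of_le h2)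
            · simp [hq, hp, hr, hd]
              exact ih_same _ _ (Nat.le_succ_of_le h2)
      · simp [hq]
        exact ih_same _ _ (Nat.le_succ_of_le h2)
  · simp only [dif_neg h, pvBuild, PySem.List.slice_from_natCast]
    split <;> simp
termination_by cs.length - i

-- the zip/slice/filter pass of B, with Int-cast bounds, computes pvBuild
theorem pvZipBuildInt (cs : List Char) (bs : List Nat) (s : Nat) :
    ((((s : Int) :: bs.map Nat.cast).zip (bs.map Nat.cast ++ [(cs.length : Int)])).map
        (fun p => String.ofList (PySem.Chars.strip
          (PySem.List.slice cs (some p.1) (some p.2))))).filter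
      (fun p => decide (p ≠ "")) = pvBuild cs s bs := by
  induction bs generalizing s with
  | nil =>
    have hlen : (List.drop s cs).take (cs.length - s) = List.drop s cs :=
      List.take_of_length_le (by simp)
    simp [pvBuild, PySem.List.slice_natCast, hlen]
    split <;> simp_all
  | cons b bs ih =>
    simp only [pvBuild, ← ih b]
    by_cases hc : PySem.Chars.strip (List.take (b - s) (List.drop s cs)) = [] <;>
      simp [PySem.List.slice_natCast, hc]

-- closed-form scan state: (in_single, depth) before position i
def pvStep (s : Bool × Int) (c : Char) : Bool × Int :=
  if c = '\'' then (!s.1, s.2)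
  else if s.1 then s
  else if c = '(' then (s.1, s.2 + 1)
  else if c = ')' then (s.1, s.2 - 1)
  else s

def pvState (cs : List Char) (i : Nat) : Bool × Int := (cs.take i).foldl pvStep (false, 0)

theorem pvState_succ (cs : List Char) (i : Nat) (h : i < cs.length) :
    pvState cs (i + 1) = pvStep (pvState cs i) cs[i] := by
  unfold pvState
  rw [List.take_succ, List.getElem?_eq_getElem h, Option.toList_some, List.foldl_append,
    List.foldl_cons, List.foldl_nil]

theorem pvStep_eq (q : Bool) (d : Int) (c : Char) :
    pvStep (q, d) c = ((if c = '\'' then !q else q),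
      (if (!q && decide (c ≠ '\'')) = true
       then (if c = '(' then d + 1 else if c = ')' then d - 1 else d) else d)) := by
  unfold pvStep
  by_cases hq : c = '\'' <;> cases q <;> by_cases hp : c = '(' <;> by_cases hr : c = ')' <;>
    simp_all

theorem pvCodeMask_length (cs : List Char) (q : Bool) :
    (pvCodeMask cs q).length = cs.length := by
  induction cs generalizing q with
  | nil => rfl
  | cons c rest ih => simp [pvCodeMask, ih]

theorem pvDepthList_length (l : List (Char × Bool)) (d : Int) :
    (pvDepthList l d).length = l.length := by
  induction l generalizing d with
  | nil => rfl
  | cons p rest ih => cases p; simp [pvDepthList, ih]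

-- the two mask lists agree with the closed-form state fold
theorem pvMask_getElem (cs : List Char) (q : Bool) (d : Int) (i : Nat) (h : i < cs.length) :
    (pvCodeMask cs q)[i]? = some (!((cs.take i).foldl pvStep (q, d)).1 && decide (cs[i] ≠ '\''))
    ∧ (pvDepthList (cs.zip (pvCodeMask cs q)) d)[i]? = some (((cs.take i).foldl pvStep (q, d)).2) := by
  induction cs generalizing q d i with
  | nil => simp at h
  | cons c rest ih =>
    cases i with
    | zero => simp [pvCodeMask, pvDepthList]
    | succ i =>
      have h' : i < rest.length := by simpa using h
      have hstep := pvStep_eq q d c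
      have hih := ih (if c = '\'' then !q else q)
        (if (!q && decide (c ≠ '\'')) = true
         then (if c = '(' then d + 1 else if c = ')' then d - 1 else d) else d) i h'
      constructor
      · simpa [pvCodeMask, List.foldl_cons, hstep] using hih.1
      · simpa [pvCodeMask, pvDepthList, List.foldl_cons, hstep] using hih.2

-- head of a 4-slice of the uppercased list
theorem pvSliceHead (cs : List Char) (i : Nat) (h : i < cs.length) (w : Char) (t : List Char)
    (hs : PySem.List.slice (PySem.Chars.upper cs) (some (i : Int)) (some ((i : Int) + 4)) = w :: t) :
    PySem.Chars.upperChar cs[i] = w := by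
  have hup : PySem.Chars.upper cs = cs.map PySem.Chars.upperChar := by
    simp [PySem.Chars.upper]
  have hc : ((i : Int) + 4) = ((i + 4 : Nat) : Int) := by push_cast; ring
  rw [hc, PySem.List.slice_natCast] at hs
  have hlen : i < (PySem.Chars.upper cs).length := by simp [hup, h]
  rw [List.drop_eq_getElem_cons hlen] at hs
  have : (PySem.Chars.upper cs)[i] = w := by
    have h4 : i + 4 - i = 3 + 1 := by omega
    rw [h4, List.take_succ_cons] at hs
    exact (List.cons_eq_cons.mp hs).1
  simpa [hup] using this

theorem pvKw_false (cs : List Char) (i : Nat) (h : i < cs.length)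
    (hc : cs[i] = '\'' ∨ cs[i] = '(' ∨ cs[i] = ')') :
    (decide (PySem.List.slice (PySem.Chars.upper cs) (some (i : Int)) (some ((i : Int) + 4)) = "WHEN".toList)
     || decide (PySem.List.slice (PySem.Chars.upper cs) (some (i : Int)) (some ((i : Int) + 4)) = "ELSE".toList)) = false := by
  simp only [Bool.or_eq_false_iff, decide_eq_false_iff_not]
  constructor <;> intro hs <;>
    [have hw := pvSliceHead cs i h 'W' ['H', 'E', 'N'] (by simpa using hs);
     have hw := pvSliceHead cs i h 'E' ['L', 'S', 'E'] (by simpa using hs)] <;>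
    rcases hc with hc | hc | hc <;> rw [hc] at hw <;> exact absurd hw (by decide)

-- the per-position predicate of B, written with the closed-form state
def pvP (cs upper : List Char) (j : Nat) : Bool :=
  (!(pvState cs j).1 && decide (cs.getD j ' ' ≠ '\''))
  && decide ((pvState cs j).2 = 0)
  && (decide (PySem.List.slice upper (some (j : Int)) (some ((j : Int) + 4)) = "WHEN".toList)
      || decide (PySem.List.slice upper (some (j : Int)) (some ((j : Int) + 4)) = "ELSE".toList))
  && pvBoundB upper j

theorem pvScanB_eq (cs : List Char) (start i : Nat) (hsi : start ≤ i) :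
    pvScanB cs (PySem.Chars.upper cs) start i (pvState cs i).2 (pvState cs i).1
      = (List.range' i (cs.length - i)).filter
          (fun j => decide (start < j) && pvP cs (PySem.Chars.upper cs) j) := by
  by_cases h : i < cs.length
  · have hrange : List.range' i (cs.length - i) = i :: List.range' (i + 1) (cs.length - (i + 1)) := by
      have : cs.length - i = (cs.length - (i + 1)) + 1 := by omega
      rw [this, List.range'_succ]
    rw [hrange, List.filter_cons]
    have ih := pvScanB_eq cs start (i + 1) (Nat.le_succ_of_le hsi)
    have hsucc := pvState_succ cs i h
    by_cases hq : cs[i] = '\''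
    · have hst : pvState cs (i + 1) = (!(pvState cs i).1, (pvState cs i).2) := by
        rw [hsucc, hq]; rfl
      have hp : pvP cs (PySem.Chars.upper cs) i = false := by
        unfold pvP
        rw [List.getD_eq_getElem _ _ h, hq]
        simp
      rw [if_neg (by simp [hp])]
      unfold pvScanB
      rw [dif_pos h]
      simp only [hq]
      rw [if_pos trivial,
        show pvScanB cs (PySem.Chars.upper cs) start (i + 1) (pvState cs i).2 (!(pvState cs i).1)
          = pvScanB cs (PySem.Chars.upper cs) start (i + 1) (pvState cs (i + 1)).2 (pvState cs (i + 1)).1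
          from by rw [hst]]
      exact ih
    · by_cases hsing : (pvState cs i).1 = true
      · have hst : pvState cs (i + 1) = pvState cs i := by
          rw [hsucc]; unfold pvStep; simp [hq, hsing]
        have hp : pvP cs (PySem.Chars.upper cs) i = false := by
          unfold pvP; simp [hsing]
        rw [if_neg (by simp [hp])]
        unfold pvScanB
        rw [dif_pos h]
        simp only []
        rw [if_neg hq, if_pos hsing,
          show pvScanB cs (PySem.Chars.upper cs) start (i + 1) (pvState cs i).2 (pvState cs i).1
            = pvScanB cs (PySem.Chars.upper cs) start (i + 1) (pvState cs (i + 1)).2 (pvState cs (i + 1)).1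
            from by rw [hst]]
        exact ih
      · have hsing' : (pvState cs i).1 = false := by simpa using hsing
        by_cases hpar : cs[i] = '('
        · have hst : pvState cs (i + 1) = ((pvState cs i).1, (pvState cs i).2 + 1) := by
            rw [hsucc]; unfold pvStep; simp [hq, hsing', hpar]
          have hp : pvP cs (PySem.Chars.upper cs) i = false := by
            unfold pvP
            rw [pvKw_false cs i h (Or.inr (Or.inl hpar))]
            simp
          rw [if_neg (by simp [hp])]
          unfold pvScanB
          rw [dif_pos h]
          simp only []
          rw [if_neg hq, if_neg hsing, if_pos hpar,
            show pvScanB cs (PySem.Chars.upper cs) start (i + 1) ((pvState cs i).2 + 1) (pvState cs i).1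
              = pvScanB cs (PySem.Chars.upper cs) start (i + 1) (pvState cs (i + 1)).2 (pvState cs (i + 1)).1
              from by rw [hst]]
          exact ih
        · by_cases hpar' : cs[i] = ')'
          · have hst : pvState cs (i + 1) = ((pvState cs i).1, (pvState cs i).2 - 1) := by
              rw [hsucc]; unfold pvStep; simp [hq, hsing', hpar, hpar']
            have hp : pvP cs (PySem.Chars.upper cs) i = false := by
              unfold pvP
              rw [pvKw_false cs i h (Or.inr (Or.inr hpar'))]
              simp
            rw [if_neg (by simp [hp])]
            unfold pvScanB
            rw [dif_pos h]
            simp only []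
            rw [if_neg hq, if_neg hsing, if_neg hpar, if_pos hpar',
              show pvScanB cs (PySem.Chars.upper cs) start (i + 1) ((pvState cs i).2 - 1) (pvState cs i).1
                = pvScanB cs (PySem.Chars.upper cs) start (i + 1) (pvState cs (i + 1)).2 (pvState cs (i + 1)).1
                from by rw [hst]]
            exact ih
          · have hst : pvState cs (i + 1) = pvState cs i := by
              rw [hsucc]; unfold pvStep; simp [hq, hsing', hpar, hpar']
            have hcond : (decide ((pvState cs i).2 = 0) && decide (start < i)
                && (decide (PySem.List.slice (PySem.Chars.upper cs) (some (i : Int)) (some ((i : Int) + 4)) = "WHEN".toList)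
                    || decide (PySem.List.slice (PySem.Chars.upper cs) (some (i : Int)) (some ((i : Int) + 4)) = "ELSE".toList))
                && pvBoundB (PySem.Chars.upper cs) i)
                = (decide (start < i) && pvP cs (PySem.Chars.upper cs) i) := by
              have hcode : (!(pvState cs i).1 && decide (cs.getD i ' ' ≠ '\'')) = true := by
                rw [List.getD_eq_getElem _ _ h, hsing']
                simp [hq]
              unfold pvP
              rw [hcode]
              cases decide ((pvState cs i).2 = 0) <;> cases decide (start < i) <;>
                cases (decide (PySem.List.slice (PySem.Chars.upper cs) (some (i : Int)) (some ((i : Int) + 4)) = "WHEN".toList)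
                    || decide (PySem.List.slice (PySem.Chars.upper cs) (some (i : Int)) (some ((i : Int) + 4)) = "ELSE".toList)) <;>
                cases pvBoundB (PySem.Chars.upper cs) i <;> simp
            have hrw : pvScanB cs (PySem.Chars.upper cs) start (i + 1) (pvState cs i).2 (pvState cs i).1
                = (List.range' (i + 1) (cs.length - (i + 1))).filter
                    (fun j => decide (start < j) && pvP cs (PySem.Chars.upper cs) j) := by
              rw [show pvScanB cs (PySem.Chars.upper cs) start (i + 1) (pvState cs i).2 (pvState cs i).1
                  = pvScanB cs (PySem.Chars.upper cs) start (i + 1) (pvState cs (i + 1)).2 (pvState cs (i + 1)).1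
                  from by rw [hst]]
              exact ih
            unfold pvScanB
            rw [dif_pos h]
            simp only []
            rw [if_neg hq, if_neg hsing, if_neg hpar, if_neg hpar', hcond, hrw]
  · unfold pvScanB
    have h0 : cs.length - i = 0 := by omega
    simp [dif_neg h, h0]
termination_by cs.length - i

theorem pvSkipWs_le (cs : List Char) (k : Nat) (h : k ≤ cs.length) : pvSkipWs cs k ≤ cs.length := by
  unfold pvSkipWs
  split
  · split
    · exact pvSkipWs_le cs (k + 1) (by omega)
    · exact h
  · exact h
termination_by cs.length - k

theorem pvState_ws (cs : List Char) (k : Nat) (hk : pvState cs k = (false, 0)) :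
    pvState cs (pvSkipWs cs k) = (false, 0) := by
  unfold pvSkipWs
  split
  case isTrue h =>
    split
    case isTrue hws =>
      have hk1 : pvState cs (k + 1) = (false, 0) := by
        rw [pvState_succ cs k h, hk]
        rcases hws with h1 | h1 | h1 | h1 <;> rw [h1] <;> rfl
      exact pvState_ws cs (k + 1) hk1
    case isFalse => exact hk
  case isFalse => exact hk
termination_by cs.length - k

theorem pvPyRange_natCast (a n : Nat) :
    PySem.List.pyRange (a : Int) ((a + n : Nat) : Int) 1 = (List.range' a n).map Nat.cast := by
  induction n with
  | zero => simp [PySem.List.pyRange_one_eq_nil]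
  | succ n ih =>
    have h1 : (((a + (n + 1) : Nat)) : Int) = ((a + n : Nat) : Int) + 1 := by push_cast; ring
    rw [h1, PySem.List.pyRange_one_succ_right (by push_cast; omega), List.range'_1_concat,
      List.map_append, ← ih]
    simp

-- B's filter function applied at a cast in-range index equals pvP
theorem pvPred_eq (cs : List Char) (j : Nat) (hj : 1 ≤ j) (hlen : j < cs.length) :
    (PySem.List.pyGetD (pvCodeMask cs false) (j : Int) false
      && decide (PySem.List.pyGetD (pvDepthList (cs.zip (pvCodeMask cs false)) 0) (j : Int) 0 = 0)
      && (decide (PySem.List.slice (PySem.Chars.upper cs) (some (j : Int)) (some ((j : Int) + 4)) = "WHEN".toList)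
          || decide (PySem.List.slice (PySem.Chars.upper cs) (some (j : Int)) (some ((j : Int) + 4)) = "ELSE".toList))
      && !(pvWordB (PySem.List.pyGetD (PySem.Chars.upper cs) ((j : Int) - 1) ' '))
      && (decide ((cs.length : Int) ≤ (j : Int) + 4)
          || !(pvWordB (PySem.List.pyGetD (PySem.Chars.upper cs) ((j : Int) + 4) ' '))))
    = pvP cs (PySem.Chars.upper cs) j := by
  have hmask := pvMask_getElem cs false 0 j hlen
  have hcode : PySem.List.pyGetD (pvCodeMask cs false) (j : Int) false
      = (!(pvState cs j).1 && decide (cs[j] ≠ '\'')) := by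
    rw [PySem.List.pyGetD_natCast]
    have : j < (pvCodeMask cs false).length := by rw [pvCodeMask_length]; exact hlen
    rw [List.getD_eq_getElem _ _ this, ← Option.some_inj, ← List.getElem?_eq_getElem this, hmask.1]
    rfl
  have hdep : PySem.List.pyGetD (pvDepthList (cs.zip (pvCodeMask cs false)) 0) (j : Int) 0
      = (pvState cs j).2 := by
    rw [PySem.List.pyGetD_natCast]
    have : j < (pvDepthList (cs.zip (pvCodeMask cs false)) 0).length := by
      rw [pvDepthList_length, List.length_zip, pvCodeMask_length]; omega
    rw [List.getD_eq_getElem _ _ this, ← Option.some_inj, ← List.getElem?_eq_getElem this, hmask.2]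
    rfl
  have hbound : (!(pvWordB (PySem.List.pyGetD (PySem.Chars.upper cs) ((j : Int) - 1) ' '))
      && (decide ((cs.length : Int) ≤ (j : Int) + 4)
          || !(pvWordB (PySem.List.pyGetD (PySem.Chars.upper cs) ((j : Int) + 4) ' '))))
      = pvBoundB (PySem.Chars.upper cs) j := by
    have hul : (PySem.Chars.upper cs).length = cs.length := by
      simp [PySem.Chars.upper]
    have e4 : decide ((cs.length : Int) ≤ (j : Int) + 4)
        = !decide (j + 4 < (PySem.Chars.upper cs).length) := by
      rw [hul]
      by_cases h4 : j + 4 < cs.length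
      · rw [decide_eq_true h4,
          decide_eq_false (show ¬((cs.length : Int) ≤ (j : Int) + 4) by push_cast; omega)]
        rfl
      · rw [decide_eq_false h4,
          decide_eq_true (show ((cs.length : Int) ≤ (j : Int) + 4) by push_cast; omega)]
        rfl
    unfold pvBoundB pvWordB
    rw [e4, decide_eq_true (show 0 < j by omega)]
    cases hb : (PySem.Str.isalnum (PySem.List.pyGetD (PySem.Chars.upper cs) ((j : Int) - 1) ' ')
        || decide (PySem.List.pyGetD (PySem.Chars.upper cs) ((j : Int) - 1) ' ' = '_')) <;>
      cases h4 : decide (j + 4 < (PySem.Chars.upper cs).length) <;>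
      cases ha : (PySem.Str.isalnum (PySem.List.pyGetD (PySem.Chars.upper cs) ((j : Int) + 4) ' ')
          || decide (PySem.List.pyGetD (PySem.Chars.upper cs) ((j : Int) + 4) ' ' = '_')) <;>
      simp_all
  unfold pvP
  rw [hcode, hdep, ← hbound, List.getD_eq_getElem _ _ hlen]
  simp [Bool.and_assoc]

-- ===== VERDICT (by name: the statement is the Claim_ definition above) =====
theorem split_case_clauses_py_spec : Claim_equal_split_case_clauses_py := by
  intro text _
  unfold Spec_split_case_clauses_py split_case_clauses_py split_case_clauses_py_alt
  simp only []
  set cs := text.toList with hcs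
  set start := pvSkipWs cs 0 with hstart
  have hsl : start ≤ cs.length := pvSkipWs_le cs 0 (Nat.zero_le _)
  have hstate : pvState cs start = (false, 0) := pvState_ws cs 0 rfl
  rw [pvLoopA_eq cs (PySem.Chars.upper cs) start start start 0 false [] le_rfl le_rfl (Or.inl rfl)]
  have hA : pvScanB cs (PySem.Chars.upper cs) start start 0 false
      = (List.range' start (cs.length - start)).filter
          (fun j => decide (start < j) && pvP cs (PySem.Chars.upper cs) j) := by
    have := pvScanB_eq cs start start le_rfl
    rw [hstate] at this
    exact this
  -- the common boundary index list
  set nb := (List.range' (start + 1) (cs.length - (start + 1))).filter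
      (fun j => pvP cs (PySem.Chars.upper cs) j) with hnb
  have hA2 : pvScanB cs (PySem.Chars.upper cs) start start 0 false = nb := by
    rw [hA, hnb]
    rcases Nat.lt_or_ge start cs.length with hlt | hge
    · have hsp : cs.length - start = (cs.length - (start + 1)) + 1 := by omega
      rw [hsp, List.range'_succ, List.filter_cons]
      rw [if_neg (by simp)]
      apply List.filter_congr
      intro j hj
      have : start + 1 ≤ j := by
        have := List.mem_range'_1.mp hj
        omega
      simp [show start < j by omega]
    · have h0 : cs.length - start = 0 := by omega
      have h1 : cs.length - (start + 1) = 0 := by omega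
      simp [h0, h1]
  have hB : (PySem.List.pyRange ((start : Int) + 1) (cs.length : Int) 1).filter (fun i =>
      PySem.List.pyGetD (pvCodeMask cs false) i false
      && decide (PySem.List.pyGetD (pvDepthList (cs.zip (pvCodeMask cs false)) 0) i 0 = 0)
      && (decide (PySem.List.slice (PySem.Chars.upper cs) (some i) (some (i + 4)) = "WHEN".toList)
          || decide (PySem.List.slice (PySem.Chars.upper cs) (some i) (some (i + 4)) = "ELSE".toList))
      && !(pvWordB (PySem.List.pyGetD (PySem.Chars.upper cs) (i - 1) ' '))
      && (decide ((cs.length : Int) ≤ i + 4) || !(pvWordB (PySem.List.pyGetD (PySem.Chars.upper cs) (i + 4) ' '))))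
      = nb.map Nat.cast := by
    rcases Nat.lt_or_ge start cs.length with hlt | hge
    · have hpr : PySem.List.pyRange ((start : Int) + 1) (cs.length : Int) 1
          = (List.range' (start + 1) (cs.length - (start + 1))).map Nat.cast := by
        have e1 : ((start : Int) + 1) = (((start + 1 : Nat)) : Int) := by push_cast; ring
        have e2 : ((cs.length : Int)) = (((start + 1) + (cs.length - (start + 1)) : Nat) : Int) :=
          congrArg Nat.cast (by omega)
        rw [e1, e2, pvPyRange_natCast]
      rw [hpr, List.filter_map, hnb]
      congr 1
      apply List.filter_congr
      intro j hj
      have hjm := List.mem_range'_1.mp hj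
      have hj1 : 1 ≤ j := by omega
      have hjl : j < cs.length := by omega
      simpa using pvPred_eq cs j hj1 hjl
    · have hnil : PySem.List.pyRange ((start : Int) + 1) (cs.length : Int) 1 = [] :=
        PySem.List.pyRange_one_eq_nil (by push_cast; omega)
      have hnb0 : nb = [] := by
        rw [hnb, show cs.length - (start + 1) = 0 by omega]
        rfl
      simp [hnil, hnb0]
  rw [hA2, hB, ← pvZipBuildInt cs nb start]
  simp
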